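-- pv_equiv track=rewrite | github.com/chom-kwoy-1/chocassye | english_hangul.py | merge_ts_dz
-- ===== SOURCE A (Python) =====
-- def merge_ts_dz(phonemes):
--     phonemes = list(phonemes)
--     for idx in range(len(phonemes) - 1):
--         if phonemes[idx] == 't' and phonemes[idx + 1] == 's':
--             phonemes[idx] = 'ts'
--             phonemes[idx + 1] = ''
--         elif phonemes[idx] == 'd' and phonemes[idx + 1] == 'z':
--             phonemes[idx] = 'dz'
--             phonemes[idx + 1] = ''
--     return list(filter(lambda x: x != '', phonemes))
-- ===== SOURCE B (Python) =====
-- def merge_ts_dz(phonemes):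
--     ph = list(phonemes)
--     n = len(ph)
--     out = []
--     i = 0
--     while i < n:
--         if ph[i] == 't' and i + 1 < n and ph[i + 1] == 's':
--             out.append('ts')
--             i += 2
--         elif ph[i] == 'd' and i + 1 < n and ph[i + 1] == 'z':
--             out.append('dz')
--             i += 2
--         elif ph[i] != '':
--             out.append(ph[i])
--             i += 1
--         else:
--             i += 1
--     return out
-- ===== Notes on version B (the rewrite author's own statement) =====
-- stated objective: simpler
-- what changed: B builds the result in a single greedy forward pass (append merged token and skip two, or append the element, or drop an empty string), eliminating A's in-place mark-with-''-sentinel pass followed by a separate filter pass.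
import Mathlib
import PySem

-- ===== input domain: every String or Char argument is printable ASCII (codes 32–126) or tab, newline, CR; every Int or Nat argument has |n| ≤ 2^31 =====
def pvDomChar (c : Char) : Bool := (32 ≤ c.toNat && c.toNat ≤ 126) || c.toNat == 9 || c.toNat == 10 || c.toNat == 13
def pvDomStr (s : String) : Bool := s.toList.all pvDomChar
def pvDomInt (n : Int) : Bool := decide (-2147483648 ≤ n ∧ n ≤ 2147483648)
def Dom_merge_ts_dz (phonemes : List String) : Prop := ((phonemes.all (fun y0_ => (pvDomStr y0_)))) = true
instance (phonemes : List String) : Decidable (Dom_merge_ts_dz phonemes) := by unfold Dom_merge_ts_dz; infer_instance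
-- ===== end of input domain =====

-- B replaces A's mark-with-''-sentinel pass plus separate filter pass by a single greedy
-- forward pass (objective: simpler); return value only, A mutates no caller-visible state
-- (it copies its argument first).

-- ===== PORT A =====
-- the loop body of A: one iteration at index idx (indices produced by range are in
-- bounds, so List.getD with default "" reads exactly the Python ph[idx]/ph[idx+1])
def mergeStepA (ph : List String) (idx : Nat) : List String :=
  if ph.getD idx "" = "t" ∧ ph.getD (idx + 1) "" = "s" then
    ((ph.set idx "ts").set (idx + 1) "")
  else if ph.getD idx "" = "d" ∧ ph.getD (idx + 1) "" = "z" then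
    ((ph.set idx "dz").set (idx + 1) "")
  else ph

def merge_ts_dz (phonemes : List String) : List String :=
  let ph := (List.range (phonemes.length - 1)).foldl mergeStepA phonemes
  ph.filter (fun x => x ≠ "")

-- ===== PORT B =====
-- B's while loop walking index i over the copied list, transcribed as the structural
-- recursion on the remaining elements (each branch advances i by 2 or 1)
def mergeGoB : List String → List String
  | "t" :: "s" :: rest => "ts" :: mergeGoB rest
  | "d" :: "z" :: rest => "dz" :: mergeGoB rest
  | x :: rest => if x ≠ "" then x :: mergeGoB rest else mergeGoB rest
  | [] => []

def merge_ts_dz_alt (phonemes : List String) : List String :=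
  mergeGoB phonemes

-- ===== PRECONDITION & SPEC =====
def Spec_merge_ts_dz (phonemes : List String) (out : List String) : Prop := out = merge_ts_dz_alt phonemes
instance (phonemes : List String) (out : List String) : Decidable (Spec_merge_ts_dz phonemes out) := by unfold Spec_merge_ts_dz; infer_instance

-- ===== CLAIM (what is proved, stated in full; the proofs are below) =====
def Claim_equal_merge_ts_dz : Prop := ∀ (phonemes : List String), Dom_merge_ts_dz phonemes → Spec_merge_ts_dz phonemes (merge_ts_dz phonemes)

-- ===== LEMMAS AND PROOFS =====

-- A's loop body at index idx+1 on a cons leaves the head untouched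
theorem mergeStepA_succ (x : String) (xs : List String) (i : Nat) :
    mergeStepA (x :: xs) (i + 1) = x :: mergeStepA xs i := by
  simp [mergeStepA]
  split_ifs <;> rfl

theorem foldl_mergeStepA_shift (r : List Nat) (x : String) (xs : List String) :
    r.foldl (fun s i => mergeStepA s (i + 1)) (x :: xs) = x :: r.foldl mergeStepA xs := by
  induction r generalizing xs with
  | nil => rfl
  | cons a r ih => simp [List.foldl, mergeStepA_succ, ih]

-- the whole of A's loop, as a function of the list
def loopA (l : List String) : List String :=
  (List.range (l.length - 1)).foldl mergeStepA l

-- peeling one element off A's loop when it does not merge at position 0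
theorem loopA_cons (a : String) (xs : List String) (hxs : xs ≠ [])
    (h : mergeStepA (a :: xs) 0 = a :: xs) :
    loopA (a :: xs) = a :: loopA xs := by
  obtain ⟨b, rest, rfl⟩ := List.exists_cons_of_ne_nil hxs
  show (List.range (rest.length + 1)).foldl mergeStepA (a :: b :: rest) = _
  rw [List.range_succ_eq_map, List.foldl_cons, h, List.foldl_map, foldl_mergeStepA_shift]
  rfl

-- peeling two elements when A merges at position 0
theorem loopA_merge (a b m : String) (rest : List String)
    (h : mergeStepA (a :: b :: rest) 0 = m :: "" :: rest) :
    loopA (a :: b :: rest) = m :: loopA ("" :: rest) := by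
  show (List.range (rest.length + 1)).foldl mergeStepA (a :: b :: rest) = _
  rw [List.range_succ_eq_map, List.foldl_cons, h, List.foldl_map, foldl_mergeStepA_shift]
  rfl

def FA (l : List String) : List String := (loopA l).filter (fun x => x ≠ "")

theorem FA_blank (xs : List String) : FA ("" :: xs) = FA xs := by
  cases xs with
  | nil => rfl
  | cons b rest =>
    unfold FA
    rw [loopA_cons _ _ (by simp)]
    · simp
    · simp [mergeStepA]

theorem FA_merge (a b m : String) (rest : List String) (hm : m ≠ "")
    (h : mergeStepA (a :: b :: rest) 0 = m :: "" :: rest) :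
    FA (a :: b :: rest) = m :: FA ("" :: rest) := by
  unfold FA
  rw [loopA_merge a b m rest h]
  simp [hm]

theorem FA_cons_ne (a : String) (xs : List String) (ha : a ≠ "") (hxs : xs ≠ [])
    (h : mergeStepA (a :: xs) 0 = a :: xs) :
    FA (a :: xs) = a :: FA xs := by
  unfold FA
  rw [loopA_cons a xs hxs h]
  simp [ha]

theorem FA_eq_mergeGoB (l : List String) : FA l = mergeGoB l := by
  induction l using mergeGoB.induct with
  | case1 rest ih =>
    rw [FA_merge "t" "s" "ts" rest (by decide) (by simp [mergeStepA]), FA_blank, ih]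
    rfl
  | case2 rest ih =>
    rw [FA_merge "d" "z" "dz" rest (by decide) (by simp [mergeStepA]), FA_blank, ih]
    rfl
  | case3 x rest h1 h2 hx ih =>
    cases rest with
    | nil =>
      simp only [FA, loopA, List.length_cons, List.length_nil]
      simp [mergeGoB, hx]
    | cons b rest2 =>
      have hstep : mergeStepA (x :: b :: rest2) 0 = x :: b :: rest2 := by
        have hne : ¬(x = "t" ∧ b = "s") := fun ⟨hxt, hb⟩ => h1 rest2 hxt (by rw [hb])
        have hne2 : ¬(x = "d" ∧ b = "z") := fun ⟨hxt, hb⟩ => h2 rest2 hxt (by rw [hb])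
        simp [mergeStepA, hne, hne2]
      have hgo : mergeGoB (x :: b :: rest2) = x :: mergeGoB (b :: rest2) := by
        rw [mergeGoB]
        · simp [hx]
        · exact h1
        · exact h2
      rw [FA_cons_ne x (b :: rest2) hx (by simp) hstep, ih, hgo]
  | case4 x rest h1 h2 hx ih =>
    have hx' : x = "" := by simpa using hx
    subst hx'
    rw [FA_blank, ih]
    rfl
  | case5 => rfl

-- ===== VERDICT (by name: the statement is the Claim_ definition above) =====
theorem merge_ts_dz_spec : Claim_equal_merge_ts_dz := by
  intro phonemes _
  show merge_ts_dz phonemes = merge_ts_dz_alt phonemes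
  have := FA_eq_mergeGoB phonemes
  simpa [FA, loopA, merge_ts_dz, merge_ts_dz_alt] using this
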